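-- pv_equiv track=rewrite | github.com/hekticxox/wallet_tool | unified_wallet_scanner.py | is_known_empty_pattern
-- ===== SOURCE A (Python) =====
-- def is_known_empty_pattern(address):
--     """Check if address matches known empty patterns"""
--     # Common empty/burn addresses
--     empty_patterns = [
--         '000000000000000000000000000000000000',
--         '111111111111111111111111111111111111',
--         'aaaaaaaaaaaaaaaaaaaaaaaaaaaaaaaaaaaaa',
--         'fffffffffffffffffffffffffffffffffffff'
--     ]
--     addr_lower = address.lower().replace('0x', '')
--     return any(pattern in addr_lower for pattern in empty_patterns)
-- ===== SOURCE B (Python) =====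
-- from itertools import groupby
--
-- # thresholds: a maximal run of this char at least this long marks the address
-- _BURN_RUNS = {'0': 36, '1': 36, 'a': 37, 'f': 37}
--
-- def is_known_empty_pattern(address):
--     """Check if address matches known empty patterns (single run-length pass)."""
--     addr_lower = address.lower().replace('0x', '')
--     for ch, run in groupby(addr_lower):
--         need = _BURN_RUNS.get(ch)
--         if need is not None and sum(1 for _ in run) >= need:
--             return True
--     return False
-- ===== Notes on version B (the rewrite author's own statement) =====
-- stated objective: alternative
-- what changed: Replaces the four repeated substring scans with a single run-length pass (itertools.groupby) that checks each maximal run of identical characters against that character's per-pattern threshold.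
import Mathlib
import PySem

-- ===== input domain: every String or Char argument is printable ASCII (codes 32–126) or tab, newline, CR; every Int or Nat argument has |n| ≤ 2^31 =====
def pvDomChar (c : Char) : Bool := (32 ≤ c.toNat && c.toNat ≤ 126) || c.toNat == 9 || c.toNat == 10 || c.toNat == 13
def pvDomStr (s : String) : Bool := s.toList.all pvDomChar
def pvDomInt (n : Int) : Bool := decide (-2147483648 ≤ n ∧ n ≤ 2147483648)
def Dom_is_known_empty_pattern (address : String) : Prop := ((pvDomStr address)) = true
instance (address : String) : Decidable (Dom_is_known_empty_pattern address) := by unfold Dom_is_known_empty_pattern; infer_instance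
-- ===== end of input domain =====

-- B replaces A's four substring scans by one run-length pass over the string (alternative decomposition, same cost class).

-- ===== PORT A =====
def is_known_empty_pattern (address : String) : Bool :=
  let empty_patterns : List String :=
    [ "000000000000000000000000000000000000",
      "111111111111111111111111111111111111",
      "aaaaaaaaaaaaaaaaaaaaaaaaaaaaaaaaaaaaa",
      "fffffffffffffffffffffffffffffffffffff" ]
  let addr_lower := PySem.Str.replace (PySem.Str.lower address) "0x" ""
  empty_patterns.any (fun pattern => PySem.Str.isIn pattern addr_lower)

-- ===== PORT B =====
-- thresholds per burn char ('0'/'1' need 36, 'a'/'f' need 37): _BURN_RUNS.get + the `>=` test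
def pvHit (c : Char) (n : Nat) : Bool :=
  (decide (c = '0') && decide (36 ≤ n)) || (decide (c = '1') && decide (36 ≤ n)) ||
  (decide (c = 'a') && decide (37 ≤ n)) || (decide (c = 'f') && decide (37 ≤ n))

-- the groupby loop: current group char c with count n so far; on a new char, test the finished group
def pvRunLoop : List Char → Char → Nat → Bool
  | [], c, n => pvHit c n
  | x :: xs, c, n => if x = c then pvRunLoop xs c (n + 1) else pvHit c n || pvRunLoop xs x 1

def pvRunScan : List Char → Bool
  | [] => false
  | x :: xs => pvRunLoop xs x 1

def is_known_empty_pattern_alt (address : String) : Bool :=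
  let addr_lower := PySem.Str.replace (PySem.Str.lower address) "0x" ""
  pvRunScan addr_lower.toList

-- ===== PRECONDITION & SPEC =====
def Spec_is_known_empty_pattern (address : String) (out : Bool) : Prop := out = is_known_empty_pattern_alt address
instance (address : String) (out : Bool) : Decidable (Spec_is_known_empty_pattern address out) := by unfold Spec_is_known_empty_pattern; infer_instance

-- ===== CLAIM (what is proved, stated in full; the proofs are below) =====
def Claim_equal_is_known_empty_pattern : Prop := ∀ (address : String), Dom_is_known_empty_pattern address → Spec_is_known_empty_pattern address (is_known_empty_pattern address)

-- ===== LEMMAS AND PROOFS =====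

-- length of the leading run of c in l
def pvLead (c : Char) : List Char → Nat
  | [] => 0
  | x :: xs => if x = c then pvLead c xs + 1 else 0

-- l with its leading run of c removed
def pvStrip (c : Char) : List Char → List Char
  | [] => []
  | x :: xs => if x = c then pvStrip c xs else x :: xs

lemma pvStrip_length_le (c : Char) : ∀ l : List Char, (pvStrip c l).length ≤ l.length := by
  intro l
  induction l with
  | nil => simp [pvStrip]
  | cons x xs ih =>
    by_cases h : x = c <;> simp [pvStrip, h] <;> omega

lemma pvLead_strip (c : Char) : ∀ l : List Char, pvLead c (pvStrip c l) = 0 := by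
  intro l
  induction l with
  | nil => simp [pvStrip, pvLead]
  | cons x xs ih => by_cases h : x = c <;> simp [pvStrip, pvLead, h, ih]

lemma pvDecomp (c : Char) : ∀ l : List Char, l = List.replicate (pvLead c l) c ++ pvStrip c l := by
  intro l
  induction l with
  | nil => simp [pvStrip, pvLead]
  | cons x xs ih =>
    by_cases h : x = c
    · subst h; simp only [pvStrip, pvLead, if_pos rfl, List.replicate_succ, List.cons_append]
      exact congrArg (x :: ·) ih
    · simp [pvStrip, pvLead, h]

lemma pvPrefix_replicate_iff (c : Char) : ∀ (l : List Char) (k : Nat),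
    List.replicate k c <+: l ↔ k ≤ pvLead c l := by
  intro l
  induction l with
  | nil =>
    intro k
    cases k with
    | zero => simp [pvLead]
    | succ m => simp [pvLead, List.replicate_succ]
  | cons x xs ih =>
    intro k
    cases k with
    | zero => simp
    | succ m =>
      rw [List.replicate_succ]
      by_cases h : x = c
      · subst h
        constructor
        · intro hp
          have := (List.cons_prefix_cons.mp hp).2
          have := (ih m).mp this
          simp [pvLead]; omega
        · intro hk
          simp [pvLead] at hk
          exact List.cons_prefix_cons.mpr ⟨rfl, (ih m).mpr (by omega)⟩
      · constructor
        · intro hp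
          exact absurd (List.cons_prefix_cons.mp hp).1.symm h
        · intro hk; simp [pvLead, h] at hk

lemma pvLead_replicate_append (x : Char) (s : List Char) : ∀ m : Nat,
    pvLead x (List.replicate m x ++ s) = m + pvLead x s := by
  intro m
  induction m with
  | zero => simp
  | succ n ih => simp [List.replicate_succ, pvLead, ih]; omega

lemma pvInfix_repl_append (c x : Char) (s : List Char) (k : Nat) (hk : 0 < k)
    (h0 : pvLead x s = 0) : ∀ m : Nat,
    (List.replicate k c <:+: (List.replicate m x ++ s)) ↔
      ((x = c ∧ k ≤ m) ∨ List.replicate k c <:+: s) := by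
  intro m
  induction m with
  | zero =>
    simp only [List.replicate_zero, List.nil_append]
    constructor
    · intro h; exact Or.inr h
    · rintro (⟨_, hkm⟩ | h)
      · omega
      · exact h
  | succ n ih =>
    rw [List.replicate_succ, List.cons_append, List.infix_cons_iff, ih]
    constructor
    · rintro (hp | h)
      · have := (pvPrefix_replicate_iff c _ k).mp hp
        by_cases hxc : x = c
        · subst hxc
          rw [show (x :: (List.replicate n x ++ s)) = List.replicate (n+1) x ++ s by
                simp [List.replicate_succ]] at this
          rw [pvLead_replicate_append x s (n+1)] at this
          exact Or.inl ⟨rfl, by omega⟩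
        · simp [pvLead, hxc] at this
          omega
      · rcases h with ⟨hxc, hkm⟩ | h
        · exact Or.inl ⟨hxc, by omega⟩
        · exact Or.inr h
    · rintro (⟨hxc, hkm⟩ | h)
      · subst hxc
        left
        rw [pvPrefix_replicate_iff]
        rw [show (x :: (List.replicate n x ++ s)) = List.replicate (n+1) x ++ s by
              simp [List.replicate_succ]]
        rw [pvLead_replicate_append x s (n+1)]
        omega
      · exact Or.inr (Or.inr h)

-- infix form of the step lemma, for a cons cell
lemma pvInfix_cons_iff (c x : Char) (xs : List Char) (k : Nat) (hk : 0 < k) :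
    (List.replicate k c <:+: (x :: xs)) ↔
      ((x = c ∧ k ≤ pvLead x xs + 1) ∨ List.replicate k c <:+: pvStrip x xs) := by
  have hx : (x :: xs) = List.replicate (pvLead x xs + 1) x ++ pvStrip x xs := by
    conv_lhs => rw [show xs = List.replicate (pvLead x xs) x ++ pvStrip x xs from pvDecomp x xs]
    simp [List.replicate_succ]
  rw [hx]
  exact pvInfix_repl_append c x (pvStrip x xs) k hk (pvLead_strip x (pvStrip x xs) ▸ pvLead_strip x xs) (pvLead x xs + 1)

-- the groupby loop accumulates the current run, then restarts on the stripped tail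
lemma pvRunLoop_eq : ∀ (l : List Char) (c : Char) (n : Nat), pvRunLoop l c n = (pvHit c (n + pvLead c l) || pvRunScan (pvStrip c l)) := by
  intro l
  induction l with
  | nil => intro c n; simp [pvRunLoop, pvLead, pvStrip, pvRunScan]
  | cons x xs ih =>
    intro c n
    by_cases h : x = c
    · subst h
      have h1 : n + 1 + pvLead x xs = n + (pvLead x xs + 1) := by omega
      simp [pvRunLoop, pvLead, pvStrip, ih, h1]
    · simp [pvRunLoop, pvLead, pvStrip, h, pvRunScan]

lemma pvHit_iff (c : Char) (n : Nat) :
    pvHit c n = true ↔ ((c = '0' ∧ 36 ≤ n) ∨ (c = '1' ∧ 36 ≤ n) ∨ (c = 'a' ∧ 37 ≤ n) ∨ (c = 'f' ∧ 37 ≤ n)) := by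
  simp [pvHit, Bool.or_eq_true, Bool.and_eq_true, decide_eq_true_eq, or_assoc]

-- main: the run-length scan decides "some pattern is an infix"
lemma pvRunScan_iff : ∀ (N : Nat) (t : List Char), t.length ≤ N →
    (pvRunScan t = true ↔
      (List.replicate 36 '0' <:+: t) ∨ (List.replicate 36 '1' <:+: t) ∨
      (List.replicate 37 'a' <:+: t) ∨ (List.replicate 37 'f' <:+: t)) := by
  intro N
  induction N with
  | zero =>
    intro t ht
    have : t = [] := List.length_eq_zero_iff.mp (Nat.le_zero.mp ht)
    subst this
    simp [pvRunScan, List.infix_nil]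
  | succ n ih =>
    intro t ht
    cases t with
    | nil => simp [pvRunScan, List.infix_nil]
    | cons x xs =>
      have hxs : xs.length ≤ n := by simpa using ht
      have hst : (pvStrip x xs).length ≤ n := le_trans (pvStrip_length_le x xs) hxs
      have hscan : pvRunScan (x :: xs) = pvRunLoop xs x 1 := rfl
      rw [hscan, pvRunLoop_eq xs x 1, Bool.or_eq_true, pvHit_iff, ih _ hst,
        pvInfix_cons_iff '0' x xs 36 (by omega), pvInfix_cons_iff '1' x xs 36 (by omega),
        pvInfix_cons_iff 'a' x xs 37 (by omega), pvInfix_cons_iff 'f' x xs 37 (by omega)]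
      rw [Nat.add_comm 1 (pvLead x xs)]
      tauto

-- ===== VERDICT (by name: the statement is the Claim_ definition above) =====
theorem is_known_empty_pattern_spec : Claim_equal_is_known_empty_pattern := by
  intro address _
  unfold Spec_is_known_empty_pattern is_known_empty_pattern is_known_empty_pattern_alt
  simp only [List.any_cons, List.any_nil, Bool.or_false]
  set t := (PySem.Str.replace (PySem.Str.lower address) "0x" "").toList with ht
  have hx0 : ("000000000000000000000000000000000000" : String).toList = List.replicate 36 '0' := by decide
  have hx1 : ("111111111111111111111111111111111111" : String).toList = List.replicate 36 '1' := by decide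
  have hxa : ("aaaaaaaaaaaaaaaaaaaaaaaaaaaaaaaaaaaaa" : String).toList = List.replicate 37 'a' := by decide
  have hxf : ("fffffffffffffffffffffffffffffffffffff" : String).toList = List.replicate 37 'f' := by decide
  rw [Bool.eq_iff_iff]
  simp only [Bool.or_eq_true, PySem.Str.isIn_iff_infix, hx0, hx1, hxa, hxf, ← ht]
  rw [pvRunScan_iff t.length t (le_refl _)]
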